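-- pv_equiv track=rewrite | github.com/oddhole/pico-ble-controller | main.py | rssi_to_blink_interval
-- ===== SOURCE A (Python) =====
-- def rssi_to_blink_interval(rssi):
--     """Convert RSSI to blink interval in milliseconds"""
--     # RSSI thresholds with precise blink intervals
--     rssi_map = {
--         -30: 25,    # Excellent signal - very fast blink
--         -35: 50,    # Very strong signal
--         -40: 75,    # Strong signal
--         -45: 100,   # Good signal
--         -50: 150,   # Moderate signal
--         -60: 300,   # Fair signal
--         -70: 600,   # Weak signal
--         -80: 1000,  # Poor signal
--         -90: 1500   # Very poor signal
--     }
--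
--     # Find the appropriate interval based on RSSI value
--     # Use the threshold that the RSSI is greater than or equal to
--     for threshold in sorted(rssi_map.keys(), reverse=True):
--         if rssi >= threshold:
--             return rssi_map[threshold]
--
--     # If RSSI is worse than -90, use slowest blink
--     return 1500
-- ===== SOURCE B (Python) =====
-- import bisect
--
-- _THRESHOLDS = [-90, -80, -70, -60, -50, -45, -40, -35, -30]
-- _INTERVALS = [1500, 1000, 600, 300, 150, 100, 75, 50, 25]
--
-- def rssi_to_blink_interval(rssi):
--     """Convert RSSI to blink interval in milliseconds"""
--     idx = bisect.bisect_right(_THRESHOLDS, rssi) - 1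
--     if idx < 0:
--         return 1500
--     return _INTERVALS[idx]
-- ===== Notes on version B (the rewrite author's own statement) =====
-- stated objective: idiomatic
-- what changed: Replaces the dict plus sorted-descending linear scan with two precomputed sorted parallel lists and a single bisect_right binary-search lookup.
import Mathlib
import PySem

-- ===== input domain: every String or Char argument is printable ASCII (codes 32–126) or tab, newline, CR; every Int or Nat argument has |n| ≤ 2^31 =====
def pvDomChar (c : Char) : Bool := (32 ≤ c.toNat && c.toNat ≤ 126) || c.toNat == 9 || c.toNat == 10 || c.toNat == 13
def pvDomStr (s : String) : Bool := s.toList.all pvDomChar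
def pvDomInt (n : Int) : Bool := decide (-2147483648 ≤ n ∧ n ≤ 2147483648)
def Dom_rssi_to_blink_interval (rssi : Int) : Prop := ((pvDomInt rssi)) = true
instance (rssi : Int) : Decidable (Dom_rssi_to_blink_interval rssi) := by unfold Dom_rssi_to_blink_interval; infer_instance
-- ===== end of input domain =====

-- B replaces A's dict + sorted-descending linear scan by a bisect_right binary search
-- over two precomputed ascending parallel tables (objective: idiomatic table lookup).

-- ===== PORT A =====
-- the dict literal rssi_map, in insertion order
def pvRssiMap : PySem.Dict Int Int :=
  PySem.Dict.ofList
    [(-30, 25), (-35, 50), (-40, 75), (-45, 100), (-50, 150),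
     (-60, 300), (-70, 600), (-80, 1000), (-90, 1500)]

-- 'for threshold in sorted(rssi_map.keys(), reverse=True): if rssi >= threshold: return rssi_map[threshold]'
-- followed by 'return 1500'; the key is always present, so getD 0 is never the default
def pvALoop (rssi : Int) : List Int → Int
  | [] => 1500
  | t :: ts => if rssi ≥ t then (PySem.Dict.get? pvRssiMap t).getD 0 else pvALoop rssi ts

def rssi_to_blink_interval (rssi : Int) : Int :=
  pvALoop rssi (PySem.List.sorted (PySem.Dict.keys pvRssiMap) (fun k => k) true)

-- ===== PORT B =====
def pvThresholds : List Int := [-90, -80, -70, -60, -50, -45, -40, -35, -30]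
def pvIntervals : List Int := [1500, 1000, 600, 300, 150, 100, 75, 50, 25]

def rssi_to_blink_interval_alt (rssi : Int) : Int :=
  let idx : Int := (PySem.List.bisectRight pvThresholds rssi : Int) - 1
  if idx < 0 then 1500 else PySem.List.pyGetD pvIntervals idx 0

-- ===== PRECONDITION & SPEC =====
def Spec_rssi_to_blink_interval (rssi : Int) (out : Int) : Prop := out = rssi_to_blink_interval_alt rssi
instance (rssi : Int) (out : Int) : Decidable (Spec_rssi_to_blink_interval rssi out) := by unfold Spec_rssi_to_blink_interval; infer_instance

-- ===== CLAIM (what is proved, stated in full; the proofs are below) =====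
def Claim_equal_rssi_to_blink_interval : Prop := ∀ (rssi : Int), Dom_rssi_to_blink_interval rssi → Spec_rssi_to_blink_interval rssi (rssi_to_blink_interval rssi)

-- ===== LEMMAS AND PROOFS =====

-- common nested-if normal form of both programs
def pvNF (rssi : Int) : Int :=
  if rssi ≥ -30 then 25 else if rssi ≥ -35 then 50 else if rssi ≥ -40 then 75
  else if rssi ≥ -45 then 100 else if rssi ≥ -50 then 150 else if rssi ≥ -60 then 300
  else if rssi ≥ -70 then 600 else if rssi ≥ -80 then 1000 else if rssi ≥ -90 then 1500 else 1500

theorem pvA_eq_NF (rssi : Int) : rssi_to_blink_interval rssi = pvNF rssi := by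
  rw [rssi_to_blink_interval, pvNF, show PySem.List.sorted (PySem.Dict.keys pvRssiMap) (fun k => k) true
    = [-30, -35, -40, -45, -50, -60, -70, -80, -90] from by decide]
  simp only [pvALoop]
  norm_num [show (PySem.Dict.get? pvRssiMap (-30)).getD 0 = 25 from by decide,
    show (PySem.Dict.get? pvRssiMap (-35)).getD 0 = 50 from by decide,
    show (PySem.Dict.get? pvRssiMap (-40)).getD 0 = 75 from by decide,
    show (PySem.Dict.get? pvRssiMap (-45)).getD 0 = 100 from by decide,
    show (PySem.Dict.get? pvRssiMap (-50)).getD 0 = 150 from by decide,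
    show (PySem.Dict.get? pvRssiMap (-60)).getD 0 = 300 from by decide,
    show (PySem.Dict.get? pvRssiMap (-70)).getD 0 = 600 from by decide,
    show (PySem.Dict.get? pvRssiMap (-80)).getD 0 = 1000 from by decide,
    show (PySem.Dict.get? pvRssiMap (-90)).getD 0 = 1500 from by decide]

theorem pvB_eq_NF (rssi : Int) : rssi_to_blink_interval_alt rssi = pvNF rssi := by
  obtain ⟨hle, hlo, hhi⟩ := PySem.List.bisectRight_spec pvThresholds rssi (by decide)
  rw [pvNF]
  show (if ((PySem.List.bisectRight pvThresholds rssi : Int) - 1) < 0 then (1500:Int)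
    else PySem.List.pyGetD pvIntervals ((PySem.List.bisectRight pvThresholds rssi : Int) - 1) 0) = _
  set n := PySem.List.bisectRight pvThresholds rssi with hn
  simp only [pvThresholds, List.length_cons, List.length_nil] at hle hlo hhi
  interval_cases n <;>
  · first
    | (have h2 := hhi 0 (by omega) (by omega); simp at h2;
       norm_num; split_ifs <;> omega)
    | (have h1 := hlo 8 (by omega) (by omega); simp at h1;
       norm_num [PySem.List.pyGetD, PySem.List.pyGet?, PySem.List.pyIdx?, pvIntervals,
         show Int.toNat 8 = 8 from rfl];
       split_ifs <;> omega)
    | (first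
        | have h1 := hlo 0 (by omega) (by omega); have h2 := hhi 1 (by omega) (by omega)
        | have h1 := hlo 1 (by omega) (by omega); have h2 := hhi 2 (by omega) (by omega)
        | have h1 := hlo 2 (by omega) (by omega); have h2 := hhi 3 (by omega) (by omega)
        | have h1 := hlo 3 (by omega) (by omega); have h2 := hhi 4 (by omega) (by omega)
        | have h1 := hlo 4 (by omega) (by omega); have h2 := hhi 5 (by omega) (by omega)
        | have h1 := hlo 5 (by omega) (by omega); have h2 := hhi 6 (by omega) (by omega)
        | have h1 := hlo 6 (by omega) (by omega); have h2 := hhi 7 (by omega) (by omega)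
        | have h1 := hlo 7 (by omega) (by omega); have h2 := hhi 8 (by omega) (by omega));
      simp at h1 h2;
      norm_num [PySem.List.pyGetD, PySem.List.pyGet?, PySem.List.pyIdx?, pvIntervals,
        show Int.toNat 0 = 0 from rfl, show Int.toNat 1 = 1 from rfl,
        show Int.toNat 2 = 2 from rfl, show Int.toNat 3 = 3 from rfl,
        show Int.toNat 4 = 4 from rfl, show Int.toNat 5 = 5 from rfl,
        show Int.toNat 6 = 6 from rfl, show Int.toNat 7 = 7 from rfl];
      split_ifs <;> omega

-- ===== VERDICT (by name: the statement is the Claim_ definition above) =====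
theorem rssi_to_blink_interval_spec : Claim_equal_rssi_to_blink_interval := by
  intro rssi _
  show rssi_to_blink_interval rssi = rssi_to_blink_interval_alt rssi
  rw [pvA_eq_NF, pvB_eq_NF]
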